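-- pv_equiv track=rewrite | github.com/MrBrantCode/unitest_baseline | mut_generate/mist_train_cf/cf_79963/solution.py | min_palindrome
-- ===== SOURCE A (Python) =====
-- def min_palindrome(word):
--     letters = {}
--     for char in word:
--         if char not in letters:
--             letters[char] = 1
--         else:
--             letters[char] += 1
--
--     odd_count = sum(1 for count in letters.values() if count % 2 != 0)
--
--     if odd_count > 1:
--         return len(word) + odd_count - 1
--     else:
--         return len(word)
-- ===== SOURCE B (Python) =====
-- def min_palindrome(word):
--     chars = sorted(word)
--     n = len(chars)
--     odd_count = 0
--     i = 0
--     while i < n: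
--         j = i + 1
--         while j < n and chars[j] == chars[i]:
--             j += 1
--         if (j - i) % 2 == 1:
--             odd_count += 1
--         i = j
--     if odd_count > 1:
--         return len(word) + odd_count - 1
--     else:
--         return len(word)
-- ===== Notes on version B (the rewrite author's own statement) =====
-- stated objective: alternative
-- what changed: Replaces the character-count dict plus a pass over its values with sort-then-scan: sort the characters and count odd-length runs of equal characters in one linear scan, maintaining no per-character counts at all.
import Mathlib
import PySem

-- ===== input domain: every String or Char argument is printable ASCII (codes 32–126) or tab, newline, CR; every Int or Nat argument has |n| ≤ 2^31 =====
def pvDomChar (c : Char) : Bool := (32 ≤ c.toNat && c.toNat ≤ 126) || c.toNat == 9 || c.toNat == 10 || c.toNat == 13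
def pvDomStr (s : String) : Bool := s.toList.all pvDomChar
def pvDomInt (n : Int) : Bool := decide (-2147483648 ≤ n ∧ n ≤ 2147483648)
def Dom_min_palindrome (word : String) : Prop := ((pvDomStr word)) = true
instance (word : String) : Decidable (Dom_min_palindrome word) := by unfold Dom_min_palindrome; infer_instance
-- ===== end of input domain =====

-- B replaces A's character-count dict and value pass with sort-then-scan (sort the
-- characters, count odd-length runs of equal characters in one scan); objective: alternative.


-- ===== PORT A =====
def min_palindrome (word : String) : Int :=
  let letters : PySem.Dict Char Int :=
    word.toList.foldl
      (fun d c => if d.contains c = false then d.insert c 1 else d.modify c 0 (· + 1))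
      PySem.Dict.empty
  let odd_count : Int :=
    letters.values.foldl (fun acc v => if PySem.Int.mod v 2 ≠ 0 then acc + 1 else acc) 0
  if odd_count > 1 then PySem.Str.len word + odd_count - 1 else PySem.Str.len word

-- ===== PORT B =====
-- B's nested while over the sorted list: each outer step consumes one run
-- (the inner 'while chars[j] == chars[i]' is the takeWhile over the rest).
def scanRuns : List Char → Nat
  | [] => 0
  | c :: rest =>
      (if (rest.takeWhile (· == c)).length + 1 ≡ 1 [MOD 2] then 1 else 0)
        + scanRuns (rest.dropWhile (· == c))
termination_by l => l.length
decreasing_by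
  simp only [List.length_cons]
  exact Nat.lt_succ_of_le (List.length_dropWhile_le _ _)

def min_palindrome_alt (word : String) : Int :=
  let chars : List Char := PySem.List.sorted word.toList (fun x => x) false
  let odd_count : Int := (scanRuns chars : Int)
  if odd_count > 1 then PySem.Str.len word + odd_count - 1 else PySem.Str.len word

-- ===== PRECONDITION & SPEC =====
def Spec_min_palindrome (word : String) (out : Int) : Prop := out = min_palindrome_alt word
instance (word : String) (out : Int) : Decidable (Spec_min_palindrome word out) := by unfold Spec_min_palindrome; infer_instance

-- ===== CLAIM =====
def Claim_equal_min_palindrome : Prop := ∀ (word : String), Dom_min_palindrome word → Spec_min_palindrome word (min_palindrome word)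

-- ===== LEMMAS AND PROOFS =====

-- A's build-the-counts loop is collections.Counter (membership test included).
lemma lettersA_eq_counter (l : List Char) :
    l.foldl (fun d c => if d.contains c = false then d.insert c 1 else d.modify c 0 (· + 1))
      PySem.Dict.empty = PySem.Dict.counter l := by
  have hstep : ∀ (d : PySem.Dict Char Int) (c : Char),
      (if d.contains c = false then d.insert c 1 else d.modify c 0 (· + 1))
        = d.modify c 0 (· + 1) := by
    intro d c
    by_cases h : d.contains c = false
    · simp [h, PySem.Dict.modify, PySem.Dict.getD_of_not_contains d (0 : Int) h]
    · simp [h]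
  simp only [hstep]
  rfl

-- A's odd count is the number of distinct characters with odd multiplicity.
lemma oddA_eq_dedup (l : List Char) :
    (PySem.Dict.counter l).values.countP (fun v => decide (PySem.Int.mod v 2 ≠ 0))
      = l.dedup.countP (fun c => decide (l.count c % 2 = 1)) := by
  have hvals : (PySem.Dict.counter l).values
      = (PySem.Set.ofList l).map (fun k => ((l.count k : Nat) : Int)) := by
    have := PySem.Dict.items_counter l
    simp only [PySem.Dict.values, this, List.map_map]
    rfl
  rw [hvals, List.countP_map]
  have hp : ∀ k ∈ PySem.Set.ofList l,
      (((fun v => decide (PySem.Int.mod v 2 ≠ 0)) ∘ (fun k => ((l.count k : Nat) : Int))) k = true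
        ↔ (fun k => decide (l.count k % 2 = 1)) k = true) := by
    intro k _
    simp only [Function.comp_apply, decide_eq_true_eq,
      PySem.Int.mod_eq_emod_of_pos (by omega : (0 : Int) < 2)]
    omega
  rw [List.countP_congr hp]
  have hperm : (PySem.Set.ofList l).Perm l.dedup := by
    rw [List.perm_ext_iff_of_nodup (PySem.Set.nodup_ofList l) l.nodup_dedup]
    intro c
    rw [PySem.Set.mem_ofList, List.mem_dedup]
  exact hperm.countP_eq _

-- For a sorted list, scanRuns counts the distinct characters with odd multiplicity.
lemma scanRuns_sorted : ∀ (n : Nat) (l : List Char), l.length ≤ n → l.Pairwise (· ≤ ·) →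
    scanRuns l = l.dedup.countP (fun c => decide (l.count c % 2 = 1)) := by
  intro n
  induction n with
  | zero =>
    intro l hl _
    have : l = [] := List.eq_nil_of_length_eq_zero (Nat.le_zero.mp hl)
    subst this; simp [scanRuns]
  | succ n ih =>
    intro l hl hs
    match l with
    | [] => simp [scanRuns]
    | c :: rest =>
      set t := rest.takeWhile (· == c) with ht
      set d := rest.dropWhile (· == c) with hd
      have hrest : rest = t ++ d := (List.takeWhile_append_dropWhile).symm
      have htc : ∀ x ∈ t, x = c := by
        intro x hx
        have := List.mem_takeWhile_imp hx
        exact eq_of_beq this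
      have hcle : ∀ x ∈ rest, c ≤ x := (List.pairwise_cons.mp hs).1
      have hdsub : d.Sublist rest := List.dropWhile_sublist _
      have hds : d.Pairwise (· ≤ ·) := ((List.pairwise_cons.mp hs).2).sublist hdsub
      have hcnd : c ∉ d := by
        intro hcd
        match hdd : d with
        | [] => simp at hcd
        | h :: d' =>
          have hh : ¬ ((h == c) = true) := by
            have := List.head?_dropWhile_not (· == c) rest
            rw [← hd] at this
            simpa using this
          have hhc : h ≠ c := fun e => hh (by simp [e])
          rcases List.mem_cons.mp hcd with h1 | h2
          · exact hhc h1.symm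
          · have h3 : h ≤ c := (List.pairwise_cons.mp hds).1 c h2
            have h4 : c ≤ h := hcle h (hdsub.mem List.mem_cons_self)
            exact hhc (le_antisymm h3 h4)
      have hcl : (c :: rest).count c = t.length + 1 := by
        rw [hrest]
        have htcount : t.count c = t.length := by
          rw [List.count_eq_length]
          intro x hx; exact ((htc x hx) ▸ rfl)
        have hdcount : d.count c = 0 := List.count_eq_zero.mpr hcnd
        simp [List.count_append, htcount, hdcount]
      have hother : ∀ c', c' ≠ c → (c :: rest).count c' = d.count c' := by
        intro c' hne
        rw [hrest]
        have htz : t.count c' = 0 := List.count_eq_zero.mpr (fun h => hne (htc c' h))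
        simp [List.count_append, List.count_cons, htz]
        exact fun e => hne e.symm
      -- dedup of l is a permutation of c :: d.dedup
      have hndm : (c :: d.dedup).Nodup := by
        refine List.nodup_cons.mpr ⟨fun h => hcnd (List.mem_dedup.mp h), d.nodup_dedup⟩
      have hmemld : ∀ x, x ∈ (c :: rest).dedup ↔ x ∈ c :: d.dedup := by
        intro x
        rw [List.mem_dedup, List.mem_cons, List.mem_cons, List.mem_dedup, hrest]
        constructor
        · rintro (h | h)
          · exact Or.inl h
          · rcases List.mem_append.mp h with h1 | h2
            · exact Or.inl (htc x h1)
            · exact Or.inr h2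
        · rintro (h | h)
          · exact Or.inl h
          · exact Or.inr (List.mem_append.mpr (Or.inr h))
      have hperm : (c :: rest).dedup.Perm (c :: d.dedup) := by
        rw [List.perm_ext_iff_of_nodup (List.nodup_dedup _) hndm]
        exact hmemld
      have hdlen : d.length ≤ n := by
        have h1 : d.length ≤ rest.length := List.length_dropWhile_le _ _
        have h2 : rest.length + 1 ≤ n + 1 := by simpa using hl
        omega
      have hihd := ih d hdlen hds
      -- put it together
      rw [hperm.countP_eq]
      have hsr : scanRuns (c :: rest)
          = (if (rest.takeWhile (· == c)).length + 1 ≡ 1 [MOD 2] then 1 else 0)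
            + scanRuns (rest.dropWhile (· == c)) := by
        rw [scanRuns.eq_def]
      rw [hsr]
      rw [List.countP_cons]
      have hcongr : d.dedup.countP (fun c' => decide ((c :: rest).count c' % 2 = 1))
          = d.dedup.countP (fun c' => decide (d.count c' % 2 = 1)) := by
        apply List.countP_congr
        intro c' hc'
        have hne : c' ≠ c := fun e => hcnd (e ▸ List.mem_dedup.mp hc')
        simp [hother c' hne]
      rw [hcongr, ← hihd, hcl]
      have hmod : ((t.length + 1) ≡ 1 [MOD 2]) ↔ ((t.length + 1) % 2 = 1) := by
        unfold Nat.ModEq; omega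
      rw [← hd, ← ht]
      by_cases hpar : (t.length + 1) % 2 = 1
      · rw [if_pos (hmod.mpr hpar), if_pos (by simp [hpar]), Nat.add_comm]
      · rw [if_neg (fun h => hpar (hmod.mp h)), if_neg (by simp [hpar]), Nat.add_comm]

-- ===== VERDICT =====
theorem min_palindrome_spec : Claim_equal_min_palindrome := by
  intro word _
  show min_palindrome word = min_palindrome_alt word
  unfold min_palindrome min_palindrome_alt
  simp only [lettersA_eq_counter, PySem.List.foldl_ite_add_one, zero_add]
  set l := word.toList with hl
  set s := PySem.List.sorted l (fun x => x) false with hs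
  have hsp : s.Pairwise (· ≤ ·) := by
    have := PySem.List.sorted_pairwise (xs := l) (key := fun x => x)
    simpa using this
  have hperm : s.Perm l := PySem.List.sorted_perm _ _ _
  have hcount : ∀ c, s.count c = l.count c := fun c => hperm.count_eq c
  have hdperm : s.dedup.Perm l.dedup := hperm.dedup
  have hrhs : scanRuns s = l.dedup.countP (fun c => decide (l.count c % 2 = 1)) := by
    rw [scanRuns_sorted s.length s (le_refl _) hsp]
    have : s.dedup.countP (fun c => decide (s.count c % 2 = 1))
        = s.dedup.countP (fun c => decide (l.count c % 2 = 1)) := by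
      apply List.countP_congr
      intro c _
      simp [hcount c]
    rw [this, hdperm.countP_eq]
  rw [oddA_eq_dedup, ← hrhs]
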